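/- GENERATED by mk_final_copies.py from the proof of the farm's unit `decode_residue.1d` (farm:decode_residue.1d.1: Proof.lean) as the
   re-elaboration sweep compiled it — do not edit. -/
import Vorbis.Spec.Units.decode_residue_1d
import Vorbis.Spec.Worked.decode_residue_1d_Lemmas

open X86 X86.User Asan Vorbis Vorbis.Spec Vorbis.Spec.DecodeResidue

/-- Unit `decode_residue.1d`: from `cut1` (0x10edca, `At1d`: after the temp allocation) to the head of loop 2152 (0x10ee39, `At3` with
`i = 0`): `make_block_array` builds the row-pointer table, five instructions initialise the loop. The walk is `rows_walk` of
Lemmas.lean, with the callee's contract for the live lists inside the function (`g.others'`, `g.frames'`). -/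
theorem Vorbis.Spec.Worked.decode_residue_1d_ok : Vorbis.Spec.decode_residue_1d.Statement := by
  intro Lay hLay μ hμ u₀ hcode h_mba
  intro g hent v hat
  exact Vorbis.Spec.decode_residue_1d.rows_walk hLay hμ hcode g (h_mba g.others' g.frames') hent v hat
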